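-- pv_equiv track=rewrite | github.com/matheusrosa1/Codewars-Multilanguage-Solutions | Exercicios/contagem_ocorrencias.py | contagem_ocorrencias
-- ===== SOURCE A (Python) =====
-- def contagem_ocorrencias(array):
--   result = {}
--   for string in array:
--     palavra = string.lower()
--
--     if palavra in result:
--       result[palavra] += 1
--     else:
--       result[palavra] = 1
--
--   duplicados = {}
--
--   for palavra, quantidade in result.items():
--     if quantidade > 1:
--       duplicados[palavra] = quantidade
--
--   return duplicados
-- ===== SOURCE B (Python) =====
-- def contagem_ocorrencias(array):
--     palavras = [s.lower() for s in array]
--     counts = {}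
--     prev = None
--     run = 0
--     for w in sorted(palavras):
--         if w == prev:
--             run += 1
--         else:
--             if run > 1:
--                 counts[prev] = run
--             prev = w
--             run = 1
--     if run > 1:
--         counts[prev] = run
--     return {p: counts[p] for p in dict.fromkeys(palavras) if p in counts}
-- ===== Notes on version B (the rewrite author's own statement) =====
-- stated objective: alternative
-- what changed: Replaces hash counting plus a filter pass by sort-then-group counting: sort the lowercased words, scan runs of equal adjacent words recording run lengths > 1, then emit the recorded words in first-appearance order.
import Mathlib
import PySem

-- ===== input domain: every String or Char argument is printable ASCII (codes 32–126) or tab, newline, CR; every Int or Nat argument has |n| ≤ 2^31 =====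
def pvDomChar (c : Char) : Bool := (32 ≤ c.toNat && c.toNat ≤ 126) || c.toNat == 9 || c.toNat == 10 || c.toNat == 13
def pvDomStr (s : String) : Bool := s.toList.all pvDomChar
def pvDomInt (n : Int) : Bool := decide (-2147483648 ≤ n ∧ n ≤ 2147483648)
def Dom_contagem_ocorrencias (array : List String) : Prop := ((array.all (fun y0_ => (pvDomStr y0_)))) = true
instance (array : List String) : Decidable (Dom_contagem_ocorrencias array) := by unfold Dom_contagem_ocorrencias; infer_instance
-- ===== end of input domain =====

-- B counts by sorting the lowercased words and scanning runs of equal adjacent words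
-- instead of A's hash counting plus a filter pass (alternative algorithm, not faster).

-- ===== PORT A =====
def contagem_ocorrencias (array : List String) : List (String × Int) :=
  let result : PySem.Dict String Int := array.foldl (fun d string =>
    let palavra := PySem.Str.lower string
    if d.contains palavra then d.insert palavra (d.getD palavra 0 + 1)
    else d.insert palavra 1) PySem.Dict.empty
  let duplicados : PySem.Dict String Int := result.items.foldl (fun d pq =>
    if pq.2 > 1 then d.insert pq.1 pq.2 else d) PySem.Dict.empty
  duplicados.items

-- ===== PORT B =====
-- one iteration of B's loop over the sorted words; state = (counts, prev, run).
-- 'w == prev' with prev = None is False in Python, hence the Option comparison.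
def pvGroupStep (st : PySem.Dict String Int × Option String × Int) (w : String) :
    PySem.Dict String Int × Option String × Int :=
  match st with
  | (counts, prev, run) =>
    if prev == some w then (counts, prev, run + 1)
    else
      ((if run > 1 then
          -- 'counts[prev] = run'; run > 1 implies prev is not None, the none arm is unreachable
          (match prev with | some p => counts.insert p run | none => counts)
        else counts), some w, 1)

-- the trailing 'if run > 1: counts[prev] = run' after the loop
def pvFlushRun (st : PySem.Dict String Int × Option String × Int) : PySem.Dict String Int :=
  if st.2.2 > 1 then
    (match st.2.1 with | some p => st.1.insert p st.2.2 | none => st.1)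
  else st.1

def contagem_ocorrencias_alt (array : List String) : List (String × Int) :=
  let palavras := array.map (fun s => PySem.Str.lower s)
  let counts := pvFlushRun
    ((PySem.List.sorted palavras (fun x => x) false).foldl pvGroupStep
      (PySem.Dict.empty, none, 0))
  ((PySem.List.dedup palavras).foldl (fun d p =>
      if counts.contains p then d.insert p (counts.getD p 0) else d)
    PySem.Dict.empty).items

-- ===== PRECONDITION & SPEC =====
def Spec_contagem_ocorrencias (array : List String) (out : List (String × Int)) : Prop := out = contagem_ocorrencias_alt array
instance (array : List String) (out : List (String × Int)) : Decidable (Spec_contagem_ocorrencias array out) := by unfold Spec_contagem_ocorrencias; infer_instance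

-- ===== CLAIM (what is proved, stated in full; the proofs are below) =====
def Claim_equal_contagem_ocorrencias : Prop := ∀ (array : List String), Dom_contagem_ocorrencias array → Spec_contagem_ocorrencias array (contagem_ocorrencias array)

-- ===== LEMMAS AND PROOFS =====

-- A's counting step ('+= 1' when present, '= 1' when absent) is extensionally a counter step.
lemma stepA_eq_counter_step :
    (fun (d : PySem.Dict String Int) (p : String) =>
      if d.contains p then d.insert p (d.getD p 0 + 1) else d.insert p 1) =
    (fun (d : PySem.Dict String Int) (p : String) => d.insert p (d.getD p 0 + 1)) := by
  funext d p
  by_cases h : d.contains p = true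
  · simp [h]
  · simp only [Bool.not_eq_true] at h
    simp [h, PySem.Dict.getD_of_not_contains d 0 h]

-- a conditional-insert fold over distinct keys fresh for the accumulator appends the filtered items
lemma items_foldl_cond_insert (l : List String) (cond : String → Prop) [DecidablePred cond]
    (val : String → Int) (d : PySem.Dict String Int)
    (hfresh : ∀ k ∈ l, d.contains k = false) (hnd : l.Nodup) :
    (l.foldl (fun d k => if cond k then d.insert k (val k) else d) d).items
      = d.items ++ ((l.filter (fun k => decide (cond k))).map (fun k => (k, val k))) := by
  induction l generalizing d with
  | nil => simp
  | cons x t ih =>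
    rcases List.nodup_cons.mp hnd with ⟨hx, hnt⟩
    rw [List.foldl_cons]
    by_cases hc : cond x
    · rw [if_pos hc, ih _ (fun k hk => by
        rw [PySem.Dict.contains_insert]
        simp [show k ≠ x from fun h => hx (h ▸ hk),
          hfresh k (List.mem_cons_of_mem _ hk)]) hnt,
        PySem.Dict.items_insert_of_not_contains _ _ (hfresh x (by simp))]
      simp [hc]
    · rw [if_neg hc, ih _ (fun k hk => hfresh k (List.mem_cons_of_mem _ hk)) hnt]
      simp [hc]

-- every lookup in the run-scan result, for a sorted tail ys whose elements all dominate the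
-- current word p with positive current run length r
lemma run_fold_get? (ys : List String) (c : PySem.Dict String Int) (p : String) (r : Int)
    (hs : ys.Pairwise (· ≤ ·)) (hp : ∀ y ∈ ys, p ≤ y) (hr : 0 < r) (k : String) :
    (pvFlushRun (ys.foldl pvGroupStep (c, some p, r))).get? k =
      if k = p then (if 1 < r + (ys.count p : Int) then some (r + (ys.count p : Int)) else c.get? p)
      else if k ∈ ys then
        (if 1 < (ys.count k : Int) then some ((ys.count k : Int)) else c.get? k)
      else c.get? k := by
  induction ys generalizing c p r with
  | nil =>
    rw [List.foldl_nil]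
    by_cases hk : k = p
    · subst hk
      by_cases h1 : (1:Int) < r
      · simp [pvFlushRun, h1, PySem.Dict.get?_insert_self]
      · simp [pvFlushRun, h1]
    · by_cases h1 : (1:Int) < r
      · simp [pvFlushRun, hk, h1, PySem.Dict.get?_insert_of_ne _ _ hk]
      · simp [pvFlushRun, hk, h1]
  | cons w t ih =>
    have hwt : ∀ y ∈ t, w ≤ y := (List.pairwise_cons.mp hs).1
    have hts : t.Pairwise (· ≤ ·) := (List.pairwise_cons.mp hs).2
    have hpw : p ≤ w := hp w (by simp)
    rw [List.foldl_cons]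
    by_cases hwp : w = p
    · subst hwp
      rw [show pvGroupStep (c, some w, r) w = (c, some w, r + 1) by simp [pvGroupStep]]
      rw [ih c w (r + 1) hts hwt (by omega)]
      by_cases hk : k = w
      · subst hk
        rw [show (((k :: t).count k : Nat) : Int) = 1 + (t.count k : Int) from by
          rw [List.count_cons_self]; push_cast; ring]
        simp [← add_assoc]
      · rw [List.count_cons_of_ne (Ne.symm hk)]
        simp [hk, List.mem_cons]
    · have hpltw : p < w := lt_of_le_of_ne hpw (fun h => hwp h.symm)
      have hpnt : p ∉ t := fun h => absurd (hwt p h) (not_le.mpr hpltw)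
      rw [show pvGroupStep (c, some p, r) w =
          ((if r > 1 then c.insert p r else c), some w, 1) from by
        simp [pvGroupStep, show ¬ p = w from fun h => hwp h.symm]]
      rw [ih (if r > 1 then c.insert p r else c) w 1 hts hwt (by omega)]
      have hget : ∀ j, j ≠ p → (if r > 1 then c.insert p r else c).get? j = c.get? j := by
        intro j hj
        split
        · exact PySem.Dict.get?_insert_of_ne _ _ hj
        · rfl
      have hgetp : (if r > 1 then c.insert p r else c).get? p =
          (if (1:Int) < r then some r else c.get? p) := by
        by_cases h1 : (1:Int) < r
        · simp [h1, PySem.Dict.get?_insert_self]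
        · simp [h1]
      by_cases hk : k = p
      · subst hk
        have hknw : k ≠ w := fun h => hwp h.symm
        have hcnt : (w :: t).count k = 0 := List.count_eq_zero.mpr (by
          simp [List.mem_cons, hknw, hpnt])
        rw [hcnt]
        simp [hknw, hpnt, hgetp]
      · by_cases hkw : k = w
        · subst hkw
          rw [show (((k :: t).count k : Nat) : Int) = 1 + (t.count k : Int) from by
            rw [List.count_cons_self]; push_cast; ring]
          simp [hk, hget k hk]
        · rw [List.count_cons_of_ne (Ne.symm hkw)]
          simp [hk, hkw, List.mem_cons, hget k hk]

-- the run scan over the sorted copy of zs records exactly the multiplicities of zs that exceed 1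
lemma counts_get? (zs : List String) (k : String) :
    (pvFlushRun ((PySem.List.sorted zs (fun x => x) false).foldl pvGroupStep
        (PySem.Dict.empty, none, 0))).get? k =
      if 1 < (zs.count k : Int) then some ((zs.count k : Int)) else none := by
  have hperm : (PySem.List.sorted zs (fun x => x) false).Perm zs := PySem.List.sorted_perm zs _ _
  have hcnt : ∀ j, (PySem.List.sorted zs (fun x => x) false).count j = zs.count j :=
    fun j => hperm.count_eq j
  have hpw : (PySem.List.sorted zs (fun x => x) false).Pairwise (· ≤ ·) := by
    have := PySem.List.sorted_pairwise zs (fun x => x)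
    simpa using this
  rcases hys : PySem.List.sorted zs (fun x => x) false with _ | ⟨w, t⟩
  · rw [hys] at hcnt
    have h0 : zs.count k = 0 := by rw [← hcnt k]; simp
    simp [pvFlushRun, h0, PySem.Dict.get?_empty]
  · rw [hys] at hcnt hpw
    rw [List.foldl_cons,
      show pvGroupStep (PySem.Dict.empty, none, 0) w = (PySem.Dict.empty, some w, 1) from by
        simp [pvGroupStep],
      run_fold_get? t PySem.Dict.empty w 1 (List.pairwise_cons.mp hpw).2
        (List.pairwise_cons.mp hpw).1 (by omega) k]
    rw [← hcnt k]
    by_cases hk : k = w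
    · subst hk
      rw [show (((k :: t).count k : Nat) : Int) = 1 + (t.count k : Int) from by
        rw [List.count_cons_self]; push_cast; ring]
      simp [PySem.Dict.get?_empty]
    · rw [List.count_cons_of_ne (Ne.symm hk)]
      by_cases hm : k ∈ t
      · simp [hk, hm, PySem.Dict.get?_empty]
      · simp [hk, hm, List.count_eq_zero.mpr hm, PySem.Dict.get?_empty]

-- ===== VERDICT (by name: the statement is the Claim_ definition above) =====
theorem contagem_ocorrencias_spec : Claim_equal_contagem_ocorrencias := by
  intro array _
  unfold Spec_contagem_ocorrencias contagem_ocorrencias contagem_ocorrencias_alt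
  rw [show (fun (d : PySem.Dict String Int) (string : String) =>
        let palavra := PySem.Str.lower string
        if d.contains palavra then d.insert palavra (d.getD palavra 0 + 1)
        else d.insert palavra 1) =
      (fun d string => d.insert (PySem.Str.lower string)
        (d.getD (PySem.Str.lower string) 0 + 1)) from by
    funext d s
    exact congrFun (congrFun stepA_eq_counter_step d) (PySem.Str.lower s)]
  rw [← List.foldl_map (f := fun s => PySem.Str.lower s)
        (g := fun (d : PySem.Dict String Int) p => d.insert p (d.getD p 0 + 1)),
      PySem.Dict.foldl_insert_getD_add_one_eq_counter]
  set palavras := array.map (fun s => PySem.Str.lower s) with hpal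
  set counts := pvFlushRun ((PySem.List.sorted palavras (fun x => x) false).foldl pvGroupStep
      (PySem.Dict.empty, none, 0)) with hcounts
  have hget : ∀ j, counts.get? j =
      if 1 < (palavras.count j : Int) then some ((palavras.count j : Int)) else none := by
    intro j; rw [hcounts]; exact counts_get? palavras j
  have hcontains : ∀ j, counts.contains j = decide ((1:Int) < (palavras.count j : Int)) := by
    intro j
    rw [PySem.Dict.contains_eq_isSome_get?, hget j]
    by_cases h : (1:Int) < (palavras.count j : Int) <;> simp [h]
  have hval : ∀ j, counts.contains j = true → counts.getD j 0 = (palavras.count j : Int) := by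
    intro j hj
    rw [hcontains j] at hj
    rw [PySem.Dict.getD_eq_get?_getD, hget j, if_pos (by simpa using hj)]
    rfl
  simp only [PySem.Dict.items_counter, ← PySem.List.dedup_eq_ofList, List.foldl_map]
  rw [items_foldl_cond_insert (PySem.List.dedup palavras)
        (fun k => (1:Int) < (palavras.count k : Int)) (fun k => ((palavras.count k : Nat) : Int))
        PySem.Dict.empty (fun k _ => PySem.Dict.contains_empty k) (PySem.List.nodup_dedup palavras),
      items_foldl_cond_insert (PySem.List.dedup palavras)
        (fun k => counts.contains k = true) (fun k => counts.getD k 0)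
        PySem.Dict.empty (fun k _ => PySem.Dict.contains_empty k) (PySem.List.nodup_dedup palavras)]
  rw [List.filter_congr (l := PySem.List.dedup palavras)
    (p := fun k => decide (counts.contains k = true))
    (q := fun k => decide ((1:Int) < (palavras.count k : Int)))
    (fun k _ => by
      show decide (counts.contains k = true) = decide ((1:Int) < (palavras.count k : Int))
      rw [show (decide (counts.contains k = true)) = counts.contains k from by
        by_cases h : counts.contains k <;> simp [h]]
      rw [hcontains k])]
  apply congrArg (fun z => (PySem.Dict.empty : PySem.Dict String Int).items ++ z)
  apply List.map_congr_left
  intro k hk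
  have hc1 : (1:Int) < (palavras.count k : Int) := by
    simpa using (List.mem_filter.mp hk).2
  have hc2 : counts.contains k = true := by
    rw [hcontains k]; exact decide_eq_true hc1
  simp [hval k hc2]
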